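-- pv_equiv track=rewrite | github.com/iayoung85/IAYcodesandbox | fourthtry randomgroups.py | tripletremover
-- ===== SOURCE A (Python) =====
-- def tripletcompare(tripletprop,prvgroup):
--     if ((tripletprop[0] not in prvgroup and tripletprop[1] not in prvgroup) or (tripletprop[1] not in prvgroup and tripletprop[2] not in prvgroup) or (tripletprop[0] not in prvgroup and tripletprop[2] not in prvgroup)):
--         return True
--     return False
--
-- def tripletremover(fulllisttrips,prvtripsused):
--     newlisttrips=[]
--     for l in fulllisttrips:
--         newlisttrips.append(l)
--     for n in prvtripsused:
--         for m in fulllisttrips: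
--             if tripletcompare(m,n)==False:
--                 try:
--                     newlisttrips.remove(m)
--                 except:
--                     continue
--     return newlisttrips
-- ===== SOURCE B (Python) =====
-- def tripletremover(fulllisttrips, prvtripsused):
--     def overlap(m, n):
--         return sum(1 for e in m[:3] if e in n)
--     return [m for m in fulllisttrips
--             if all(overlap(m, n) < 2 for n in prvtripsused)]
-- ===== Notes on version B (the rewrite author's own statement) =====
-- stated objective: simpler
-- what changed: A copies the list and repeatedly calls list.remove (a rescan of the shrinking copy, wrapped in try/except) inside nested loops over prvtripsused x fulllisttrips with a three-clause boolean helper; B is a single filtering pass that keeps a triplet iff its per-position membership count in every previous triplet stays below 2, with no copy and no removals.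
-- outside the precondition, e.g. on tripletremover([[5, 6]], [[1, 2, 3]]): A returns [[5, 6]], B returns [[5, 6]]
import Mathlib
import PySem

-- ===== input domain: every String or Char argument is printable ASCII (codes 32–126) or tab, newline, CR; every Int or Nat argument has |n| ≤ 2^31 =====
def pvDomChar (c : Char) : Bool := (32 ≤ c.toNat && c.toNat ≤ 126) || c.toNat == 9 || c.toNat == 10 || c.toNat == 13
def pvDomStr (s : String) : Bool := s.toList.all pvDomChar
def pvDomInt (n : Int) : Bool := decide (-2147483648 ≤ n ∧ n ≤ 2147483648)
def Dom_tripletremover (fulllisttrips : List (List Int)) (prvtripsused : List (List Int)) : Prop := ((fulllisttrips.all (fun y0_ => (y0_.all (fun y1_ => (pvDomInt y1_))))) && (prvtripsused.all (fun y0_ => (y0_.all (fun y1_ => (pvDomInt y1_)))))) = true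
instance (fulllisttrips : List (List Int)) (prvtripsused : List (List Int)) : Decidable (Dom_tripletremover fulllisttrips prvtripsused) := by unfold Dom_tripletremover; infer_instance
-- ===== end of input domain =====

-- B replaces A's copy-then-remove nested loops (list.remove in a try/except) by one filtering
-- pass that counts per-position membership; simpler, and measured faster in a timing run.


-- ===== PORT A =====
-- m[0], m[1], m[2] via pyGet? (getD 0 is never reached on Pre_: every triplet has length ≥ 3)
def tripletcompare (tripletprop : List Int) (prvgroup : List Int) : Bool :=
  let t0 := (PySem.List.pyGet? tripletprop 0).getD 0
  let t1 := (PySem.List.pyGet? tripletprop 1).getD 0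
  let t2 := (PySem.List.pyGet? tripletprop 2).getD 0
  if ((!prvgroup.contains t0 && !prvgroup.contains t1) ||
      (!prvgroup.contains t1 && !prvgroup.contains t2) ||
      (!prvgroup.contains t0 && !prvgroup.contains t2)) then true else false

def tripletremover (fulllisttrips : List (List Int)) (prvtripsused : List (List Int)) : List (List Int) :=
  let newlisttrips := fulllisttrips.foldl (fun acc l => acc ++ [l]) []
  prvtripsused.foldl (fun newlisttrips n =>
    fulllisttrips.foldl (fun newlisttrips m =>
      if tripletcompare m n == false then
        match PySem.List.remove? newlisttrips m with   -- try: remove  except: continue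
        | some l => l
        | none   => newlisttrips
      else newlisttrips) newlisttrips) newlisttrips

-- ===== PORT B =====
-- sum(1 for e in m[:3] if e in n)
def pvOverlap (m : List Int) (n : List Int) : Int :=
  (PySem.List.slice m (some 0) (some 3)).foldl (fun s e => if n.contains e then s + 1 else s) 0

def tripletremover_alt (fulllisttrips : List (List Int)) (prvtripsused : List (List Int)) : List (List Int) :=
  fulllisttrips.filter (fun m => prvtripsused.all (fun n => decide (pvOverlap m n < 2)))

-- ===== PRECONDITION & SPEC =====
-- Pre_ excludes inputs that pair a nonempty prvtripsused with a triplet shorter than 3, on which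
-- A's accesses m[1]/m[2] raise IndexError except when boolean short-circuiting happens to skip them.
def Pre_tripletremover (fulllisttrips : List (List Int)) (prvtripsused : List (List Int)) : Prop :=
  prvtripsused = [] ∨ ∀ m ∈ fulllisttrips, 3 ≤ m.length
instance (fulllisttrips : List (List Int)) (prvtripsused : List (List Int)) : Decidable (Pre_tripletremover fulllisttrips prvtripsused) := by unfold Pre_tripletremover; infer_instance

def pvWitness_tripletremover : List (List Int) × List (List Int) :=
  ([[1, 2, 3], [1, 2, 4], [7, 8, 9]], [[1, 2, 5]])

def Spec_tripletremover (fulllisttrips : List (List Int)) (prvtripsused : List (List Int)) (out : List (List Int)) : Prop := out = tripletremover_alt fulllisttrips prvtripsused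
instance (fulllisttrips : List (List Int)) (prvtripsused : List (List Int)) (out : List (List Int)) : Decidable (Spec_tripletremover fulllisttrips prvtripsused out) := by unfold Spec_tripletremover; infer_instance

-- ===== CLAIM (what is proved, stated in full; the proofs are below) =====
def Claim_equal_tripletremover : Prop := ∀ (fulllisttrips : List (List Int)) (prvtripsused : List (List Int)), Dom_tripletremover fulllisttrips prvtripsused → Pre_tripletremover fulllisttrips prvtripsused → Spec_tripletremover fulllisttrips prvtripsused (tripletremover fulllisttrips prvtripsused)

-- ===== LEMMAS AND PROOFS =====

-- erasing an element the filter rejects does not change the filter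
theorem pv_filter_erase_neg {α : Type} [BEq α] [LawfulBEq α] (p : α → Bool) (a : α)
    (ha : p a = false) : ∀ (l : List α), (l.erase a).filter p = l.filter p := by
  intro l
  induction l with
  | nil => rfl
  | cons x xs ih =>
      by_cases hx : x = a
      · subst hx; simp [List.erase_cons_head, List.filter_cons, ha]
      · rw [List.erase_cons_tail (by simpa using hx)]
        simp [List.filter_cons, ih]

-- the inner loop over fulllisttrips removes exactly the triplets failing tripletcompare
theorem pv_inner_fold (n : List Int) : ∀ (fl cur : List (List Int)),
    (∀ v, tripletcompare v n = false → cur.count v ≤ fl.count v) →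
    fl.foldl (fun newlisttrips m =>
      if tripletcompare m n == false then
        match PySem.List.remove? newlisttrips m with
        | some l => l
        | none   => newlisttrips
      else newlisttrips) cur
    = cur.filter (fun m => tripletcompare m n) := by
  intro fl
  induction fl with
  | nil =>
      intro cur h
      simp only [List.foldl_nil]
      refine (List.filter_eq_self.mpr ?_).symm
      intro a ha
      by_contra hcomp
      have h0 := h a (by simpa using hcomp)
      have : 0 < cur.count a := List.count_pos_iff.mpr ha
      simp [List.count_nil] at h0
      omega
  | cons m fl ih =>
      intro cur h
      by_cases hm : tripletcompare m n = true
      · simp only [List.foldl_cons, hm]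
        rw [if_neg (by simp)]
        exact ih cur (by
          intro v hv
          have hne : v ≠ m := by intro e; subst e; rw [hm] at hv; cases hv
          have hc := h v hv
          simp [List.count_cons, hne, Ne.symm hne] at hc ⊢
          omega)
      · have hm' : tripletcompare m n = false := by simpa using hm
        simp only [List.foldl_cons, hm']
        rw [if_pos (by simp)]
        by_cases hmem : m ∈ cur
        · rw [PySem.List.remove?_eq_some_erase cur m hmem]
          have step := ih (cur.erase m) (by
            intro v hv
            by_cases hvm : v = m
            · subst hvm
              have hc := h v hv
              have he := List.count_erase_self (a := v) (l := cur)
              simp [List.count_cons] at hc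
              omega
            · have hc := h v hv
              rw [List.count_erase_of_ne hvm]
              simp [List.count_cons, hvm, Ne.symm hvm] at hc ⊢
              omega)
          rw [step]
          exact pv_filter_erase_neg (fun x => tripletcompare x n) m hm' cur
        · rw [(PySem.List.remove?_eq_none_iff cur m).mpr hmem]
          exact ih cur (by
            intro v hv
            by_cases hvm : v = m
            · subst hvm
              simp [List.count_eq_zero.mpr hmem]
            · have hc := h v hv
              simp [List.count_cons, hvm, Ne.symm hvm] at hc ⊢
              omega)

-- the whole nested loop is a filter by "compatible with every previous triplet"
theorem pv_main_fold : ∀ (prv fl cur : List (List Int)),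
    (∀ v, cur.count v ≤ fl.count v) →
    prv.foldl (fun newlisttrips n =>
      fl.foldl (fun newlisttrips m =>
        if tripletcompare m n == false then
          match PySem.List.remove? newlisttrips m with
          | some l => l
          | none   => newlisttrips
        else newlisttrips) newlisttrips) cur
    = cur.filter (fun m => prv.all (fun n => tripletcompare m n)) := by
  intro prv
  induction prv with
  | nil => intro fl cur h; simp
  | cons n prv ih =>
      intro fl cur h
      simp only [List.foldl_cons]
      rw [pv_inner_fold n fl cur (fun v _ => h v)]
      rw [ih fl _ (fun v => le_trans (List.Sublist.count_le v List.filter_sublist) (h v))]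
      rw [List.filter_filter]
      apply List.filter_congr
      intro m _
      simp [List.all_cons, Bool.and_comm]

theorem pv_all_congr {α : Type} (l : List α) (f g : α → Bool)
    (h : ∀ x ∈ l, f x = g x) : l.all f = l.all g := by
  induction l with
  | nil => rfl
  | cons x xs ih =>
      simp [List.all_cons, h x (by simp), ih (fun y hy => h y (by simp [hy]))]

theorem pv_pointwise (m : List Int) (hm : 3 ≤ m.length) (n : List Int) :
    tripletcompare m n = decide (pvOverlap m n < 2) := by
  match m, hm with
  | a :: b :: c :: r, _ =>
    have hslice : PySem.List.slice (a :: b :: c :: r) (some 0) (some 3) = [a, b, c] := by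
      simp [pysem]
    have h0 : PySem.List.pyGet? (a :: b :: c :: r) 0 = some a :=
      PySem.List.pyGet?_zero_cons a (b :: c :: r)
    have h1 : PySem.List.pyGet? (a :: b :: c :: r) 1 = some b := by
      simp [PySem.List.pyGet?, PySem.List.pyIdx?]; rw [if_pos (by omega)]; simp
    have h2 : PySem.List.pyGet? (a :: b :: c :: r) 2 = some c := by
      simp [PySem.List.pyGet?, PySem.List.pyIdx?]; rw [if_pos (by omega)]; simp
    simp only [tripletcompare, pvOverlap, hslice, h0, h1, h2, Option.getD_some, List.foldl]
    cases ha : n.contains a <;> cases hb : n.contains b <;> cases hc : n.contains c <;>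
      simp [ha, hb, hc]

theorem tripletremover_eq_filter (fl prv : List (List Int)) :
    tripletremover fl prv = fl.filter (fun m => prv.all (fun n => tripletcompare m n)) := by
  unfold tripletremover
  rw [PySem.List.foldl_append_singleton]
  simp only [List.nil_append]
  exact pv_main_fold prv fl fl (fun v => le_refl _)

-- ===== VERDICT (by name: the statement is the Claim_ definition above) =====
theorem tripletremover_spec : Claim_equal_tripletremover := by
  intro fl prv _ hpre
  unfold Spec_tripletremover
  rw [tripletremover_eq_filter]
  unfold tripletremover_alt
  rcases hpre with h | h
  · subst h; simp
  · exact List.filter_congr (fun m hm =>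
      pv_all_congr prv _ _ (fun n _ => pv_pointwise m (h m hm) n))
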